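-- pv_equiv track=rewrite | github.com/evanoc3/advent-of-code | src/year_2021/day_10/solution.py | _calculate_score_for
-- ===== SOURCE A (Python) =====
-- def _calculate_score_for(completion_string: str) -> int:
-- 	accumulator = 0
-- 	scores = { ")": 1, "]": 2, "}": 3, ">": 4 }
-- 	for char in completion_string:
-- 		accumulator *= 5
-- 		assert char in ")]}>"
-- 		accumulator += scores[char]
-- 	return accumulator
-- ===== SOURCE B (Python) =====
-- def _calculate_score_for(completion_string: str) -> int:
-- 	scores = { ")": 1, "]": 2, "}": 3, ">": 4 }
-- 	return sum(scores[char] * 5 ** i for i, char in enumerate(reversed(completion_string)))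
-- ===== Notes on version B (the rewrite author's own statement) =====
-- stated objective: alternative
-- what changed: Replaces the Horner accumulator loop (acc = acc*5 + digit) with a direct positional-notation sum: each character of the reversed string contributes score*5^i via enumerate, with no running accumulator multiplication.
import Mathlib
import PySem

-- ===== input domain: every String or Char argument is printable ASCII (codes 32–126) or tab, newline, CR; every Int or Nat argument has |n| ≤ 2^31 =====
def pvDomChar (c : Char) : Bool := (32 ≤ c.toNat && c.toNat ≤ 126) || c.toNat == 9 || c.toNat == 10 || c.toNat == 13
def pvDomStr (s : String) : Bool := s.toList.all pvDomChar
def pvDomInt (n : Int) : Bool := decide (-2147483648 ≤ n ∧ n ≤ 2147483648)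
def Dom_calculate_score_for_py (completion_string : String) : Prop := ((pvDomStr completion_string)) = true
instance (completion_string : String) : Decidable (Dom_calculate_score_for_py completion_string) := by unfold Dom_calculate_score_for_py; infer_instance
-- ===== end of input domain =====

-- B replaces A's Horner accumulator loop by a positional sum over the reversed string
-- (score * 5^index for each enumerated character): an alternative formulation, not faster.

-- ===== PORT A =====
-- A's Horner loop: acc = acc*5 + scores[char]; bad chars raise (AssertionError) in Python
-- and are excluded by Pre_ below (getD 0 stands where Python raises).
def calculate_score_for_py (completion_string : String) : Int :=
  let scores : PySem.Dict Char Int :=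
    PySem.Dict.ofList [(')', 1), (']', 2), ('}', 3), ('>', 4)]
  completion_string.toList.foldl
    (fun accumulator char => accumulator * 5 + (scores.get? char).getD 0) 0

-- ===== PORT B =====
def pvScoresB : PySem.Dict Char Int :=
  PySem.Dict.ofList [(')', 1), (']', 2), ('}', 3), ('>', 4)]

-- B's sum(scores[char] * 5 ** i for i, char in enumerate(reversed(s))).
-- 5 ** i: enumerate's Int index is nonnegative, so `.toNat` on the exponent is exact;
-- scores[char] raises KeyError on bad chars in Python (excluded by Pre_; getD 0 here).
def calculate_score_for_py_alt (completion_string : String) : Int :=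
  ((PySem.List.enumerate completion_string.toList.reverse).map
    (fun p => (pvScoresB.get? p.2).getD 0 * 5 ^ p.1.toNat)).sum

-- ===== PRECONDITION & SPEC =====
-- Pre_: every character is one of ")]}>"; on any other character Python A raises
-- AssertionError (and B raises KeyError), so those inputs are excluded.
def Pre_calculate_score_for_py (completion_string : String) : Prop :=
  (completion_string.toList.all
    (fun c => c == ')' || c == ']' || c == '}' || c == '>')) = true
instance (completion_string : String) : Decidable (Pre_calculate_score_for_py completion_string) := by
  unfold Pre_calculate_score_for_py; infer_instance

def pvWitness_calculate_score_for_py : String := ")]}>})"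

def Spec_calculate_score_for_py (completion_string : String) (out : Int) : Prop :=
  out = calculate_score_for_py_alt completion_string
instance (completion_string : String) (out : Int) : Decidable (Spec_calculate_score_for_py completion_string out) := by
  unfold Spec_calculate_score_for_py; infer_instance

-- ===== CLAIM (what is proved, stated in full; the proofs are below) =====
def Claim_equal_calculate_score_for_py : Prop :=
  ∀ (completion_string : String), Dom_calculate_score_for_py completion_string →
    Pre_calculate_score_for_py completion_string →
    Spec_calculate_score_for_py completion_string (calculate_score_for_py completion_string)

-- ===== LEMMAS AND PROOFS =====

-- The Horner fold started at `acc` equals acc·5^len plus B's positional sum.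
theorem pv_horner_eq_possum (l : List Char) (acc : Int) :
    l.foldl (fun a c => a * 5 + (pvScoresB.get? c).getD 0) acc
      = acc * 5 ^ l.length +
        ((PySem.List.enumerate l.reverse).map
          (fun p => (pvScoresB.get? p.2).getD 0 * 5 ^ p.1.toNat)).sum := by
  induction l generalizing acc with
  | nil => simp [PySem.List.enumerate_nil]
  | cons c t ih =>
    simp only [List.foldl_cons, List.reverse_cons, List.length_cons]
    rw [ih, PySem.List.enumerate_append]
    simp [List.length_reverse, pow_succ]
    ring

-- ===== VERDICT (by name: the statement is the Claim_ definition above) =====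
theorem calculate_score_for_py_spec : Claim_equal_calculate_score_for_py := by
  intro s _ _
  show calculate_score_for_py s = calculate_score_for_py_alt s
  show s.toList.foldl (fun a c => a * 5 + (pvScoresB.get? c).getD 0) 0
      = calculate_score_for_py_alt s
  rw [pv_horner_eq_possum]
  simp [calculate_score_for_py_alt]
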